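-- pv_equiv track=rewrite | github.com/SumanthBalachandra/CSCI-544-Applied-Natural-Language-Processing | Assignment 3/hmmlearn3.py | getWordTagMapAndTagCount
-- ===== SOURCE A (Python) =====
-- def getWordTagMapAndTagCount(lines):
--     wordTagCount = {}
--     tagCount = {}
--     for line in lines:
--         words = line.split()
--         for word in words:
--             tagIndex = word.rfind('/')
--             term = word[: tagIndex]
--             tag = word[tagIndex + 1 :]
--             if tag not in tagCount:
--                 tagCount[tag] = 1
--             else:
--                 tagCount[tag] += 1
--             #term = term.lower()
--             if term not in wordTagCount:
--                 wordTagCount[term] = {}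
--                 wordTagCount[term][tag] = 1
--             else:
--                 if tag not in wordTagCount[term]:
--                     wordTagCount[term][tag] = 1
--                 else:
--                     wordTagCount[term][tag] += 1
--     return wordTagCount, tagCount
-- ===== SOURCE B (Python) =====
-- def _count(xs):
--     d = {}
--     for x in xs:
--         d[x] = d.get(x, 0) + 1
--     return d
--
--
-- def getWordTagMapAndTagCount(lines):
--     # materialize all (term, tag) tokens first (same rfind('/')/slicing rule as the original)
--     tokens = [(w[:w.rfind('/')], w[w.rfind('/') + 1:])
--               for line in lines for w in line.split()]
--     # separate pass 1: global tag frequencies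
--     tagCount = _count([tag for _, tag in tokens])
--     # separate pass 2: group tags by term, then count within each group
--     groups = {}
--     for term, tag in tokens:
--         groups.setdefault(term, []).append(tag)
--     wordTagCount = {term: _count(tags) for term, tags in groups.items()}
--     return wordTagCount, tagCount
-- ===== Notes on version B (the rewrite author's own statement) =====
-- stated objective: alternative
-- what changed: A increments both dicts inside one fused loop over lines and words; B first materializes the list of (term, tag) tokens, then computes tagCount in one counting pass over the tags and wordTagCount by grouping tags per term (setdefault/append) and counting each group in a separate pass.
import Mathlib
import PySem

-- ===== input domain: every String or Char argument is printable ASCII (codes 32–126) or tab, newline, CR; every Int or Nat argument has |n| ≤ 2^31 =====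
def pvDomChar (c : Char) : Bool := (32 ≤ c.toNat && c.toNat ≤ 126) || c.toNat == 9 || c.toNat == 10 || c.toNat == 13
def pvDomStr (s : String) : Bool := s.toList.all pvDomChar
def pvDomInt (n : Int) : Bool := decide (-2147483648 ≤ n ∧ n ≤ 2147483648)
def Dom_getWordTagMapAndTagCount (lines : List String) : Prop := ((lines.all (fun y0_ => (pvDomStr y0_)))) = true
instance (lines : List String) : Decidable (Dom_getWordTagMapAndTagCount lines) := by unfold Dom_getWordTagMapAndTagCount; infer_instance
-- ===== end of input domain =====

-- B rebuilds the same two count dicts in separate passes over a materialized (term, tag) token list instead of A's single fused loop (alternative decomposition, same cost).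


-- ===== PORT A =====
-- Port of A: one fused loop over lines/words updating both dicts; the Python's in-place
-- `wordTagCount[term][tag] += 1` is the overwrite-in-place `insert` (position kept), exact.
def getWordTagMapAndTagCount (lines : List String) : (List (String × List (String × Int))) × (List (String × Int)) :=
  let st := lines.foldl (fun st line =>
      (PySem.Str.split₀ line).foldl (fun st word =>
        let tagIndex := PySem.Str.rfind word "/"
        let term := PySem.Str.slice word none (some tagIndex)
        let tag := PySem.Str.slice word (some (tagIndex + 1)) none
        let tc := if st.2.contains tag = false then st.2.insert tag 1
                  else st.2.insert tag (st.2.getD tag 0 + 1)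
        let wtc :=
          if st.1.contains term = false then
            st.1.insert term (PySem.Dict.empty.insert tag 1)
          else
            let inner := st.1.getD term PySem.Dict.empty
            if inner.contains tag = false then st.1.insert term (inner.insert tag 1)
            else st.1.insert term (inner.insert tag (inner.getD tag 0 + 1))
        (wtc, tc)) st)
    ((PySem.Dict.empty : PySem.Dict String (PySem.Dict String Int)),
     (PySem.Dict.empty : PySem.Dict String Int))
  (st.1.items.map (fun p => (p.1, p.2.items)), st.2.items)

-- ===== PORT B =====
-- B: materialize the (term, tag) token list, then aggregate in separate passes.
def pvCount (xs : List String) : PySem.Dict String Int :=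
  xs.foldl (fun d x => d.insert x (d.getD x 0 + 1)) PySem.Dict.empty

def pvTokens (lines : List String) : List (String × String) :=
  lines.flatMap (fun line => (PySem.Str.split₀ line).map (fun w =>
    let i := PySem.Str.rfind w "/"
    (PySem.Str.slice w none (some i), PySem.Str.slice w (some (i + 1)) none)))

def getWordTagMapAndTagCount_alt (lines : List String) : (List (String × List (String × Int))) × (List (String × Int)) :=
  let tokens := pvTokens lines
  let tagCount := pvCount (tokens.map (fun p => p.2))
  -- groups.setdefault(term, []).append(tag)  ==  modify term [] (· ++ [tag])  (exact: append in place)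
  let groups := tokens.foldl (fun d p => d.modify p.1 [] (fun l => l ++ [p.2]))
    (PySem.Dict.empty : PySem.Dict String (List String))
  (groups.items.map (fun p => (p.1, (pvCount p.2).items)), tagCount.items)

-- ===== PRECONDITION & SPEC =====
def Spec_getWordTagMapAndTagCount (lines : List String) (out : (List (String × List (String × Int))) × (List (String × Int))) : Prop := out = getWordTagMapAndTagCount_alt lines
instance (lines : List String) (out : (List (String × List (String × Int))) × (List (String × Int))) : Decidable (Spec_getWordTagMapAndTagCount lines out) := by unfold Spec_getWordTagMapAndTagCount; infer_instance

-- ===== CLAIM (what is proved, stated in full; the proofs are below) =====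
def Claim_equal_getWordTagMapAndTagCount : Prop := ∀ (lines : List String), Dom_getWordTagMapAndTagCount lines → Spec_getWordTagMapAndTagCount lines (getWordTagMapAndTagCount lines)

-- ===== LEMMAS AND PROOFS =====

-- proof-only helpers: the two per-token state updates of A's fused loop
def pvTCStep (d : PySem.Dict String Int) (p : String × String) : PySem.Dict String Int :=
  if d.contains p.2 = false then d.insert p.2 1 else d.insert p.2 (d.getD p.2 0 + 1)

def pvWTCStep (d : PySem.Dict String (PySem.Dict String Int)) (p : String × String) :
    PySem.Dict String (PySem.Dict String Int) :=
  if d.contains p.1 = false then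
    d.insert p.1 (PySem.Dict.empty.insert p.2 1)
  else
    let inner := d.getD p.1 PySem.Dict.empty
    if inner.contains p.2 = false then d.insert p.1 (inner.insert p.2 1)
    else d.insert p.1 (inner.insert p.2 (inner.getD p.2 0 + 1))

def pvWStep (d : PySem.Dict String (PySem.Dict String Int)) (p : String × String) :
    PySem.Dict String (PySem.Dict String Int) :=
  d.modify p.1 PySem.Dict.empty (fun inner => inner.insert p.2 (inner.getD p.2 0 + 1))

lemma pvTCStep_eq (d : PySem.Dict String Int) (p : String × String) :
    pvTCStep d p = d.insert p.2 (d.getD p.2 0 + 1) := by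
  unfold pvTCStep
  by_cases h : d.contains p.2 = false
  · simp [h, PySem.Dict.getD_of_not_contains d (0 : Int) h]
  · simp [h]

lemma pvWTCStep_eq (d : PySem.Dict String (PySem.Dict String Int)) (p : String × String) :
    pvWTCStep d p = pvWStep d p := by
  unfold pvWTCStep pvWStep
  by_cases h : d.contains p.1 = false
  · simp [h, PySem.Dict.modify, PySem.Dict.getD_of_not_contains d PySem.Dict.empty h]
  · simp only [h, PySem.Dict.modify]
    by_cases h2 : (d.getD p.1 PySem.Dict.empty).contains p.2 = false
    · simp [h2, PySem.Dict.getD_of_not_contains (d.getD p.1 PySem.Dict.empty) (0 : Int) h2]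
    · simp [h2]

-- A's fused double loop over lines/words is one fold over the materialized token list
lemma pv_nested_fold (lines : List String)
    (init : PySem.Dict String (PySem.Dict String Int) × PySem.Dict String Int) :
    lines.foldl (fun st line =>
      (PySem.Str.split₀ line).foldl (fun st word =>
        let tagIndex := PySem.Str.rfind word "/"
        let term := PySem.Str.slice word none (some tagIndex)
        let tag := PySem.Str.slice word (some (tagIndex + 1)) none
        let tc := if st.2.contains tag = false then st.2.insert tag 1
                  else st.2.insert tag (st.2.getD tag 0 + 1)
        let wtc :=
          if st.1.contains term = false then
            st.1.insert term (PySem.Dict.empty.insert tag 1)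
          else
            let inner := st.1.getD term PySem.Dict.empty
            if inner.contains tag = false then st.1.insert term (inner.insert tag 1)
            else st.1.insert term (inner.insert tag (inner.getD tag 0 + 1))
        (wtc, tc)) st) init =
    (pvTokens lines).foldl (fun st p => (pvWTCStep st.1 p, pvTCStep st.2 p)) init := by
  unfold pvTokens
  rw [List.foldl_flatMap]
  refine PySem.List.foldl_congr_mem lines _ _ init (fun acc line _ => ?_) |>.symm
  rw [List.foldl_map]
  rfl

lemma pv_A_as_tokens (lines : List String) :
    getWordTagMapAndTagCount lines =
      (((pvTokens lines).foldl pvWTCStep PySem.Dict.empty).items.map (fun p => (p.1, p.2.items)),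
       ((pvTokens lines).foldl pvTCStep PySem.Dict.empty).items) := by
  unfold getWordTagMapAndTagCount
  rw [pv_nested_fold, PySem.List.foldl_prod_mk]

lemma pv_tc_eq (tokens : List (String × String)) :
    tokens.foldl pvTCStep PySem.Dict.empty = pvCount (tokens.map (fun p => p.2)) := by
  unfold pvCount
  rw [List.foldl_map]
  exact PySem.List.foldl_congr_mem tokens _ _ _ (fun d p _ => pvTCStep_eq d p)

-- the nested-dict fold, looked up at one term, is the tag-count fold over that term's tags
lemma pv_wtc_getD (tokens : List (String × String))
    (d : PySem.Dict String (PySem.Dict String Int)) (c : String) :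
    (tokens.foldl pvWStep d).getD c PySem.Dict.empty =
      ((tokens.filter (fun p => p.1 == c)).map (fun p => p.2)).foldl
        (fun i t => i.insert t (i.getD t 0 + 1)) (d.getD c PySem.Dict.empty) := by
  induction tokens generalizing d with
  | nil => rfl
  | cons a tl ih =>
    have hmod := PySem.Dict.getD_modify d a.1 c PySem.Dict.empty
      (fun inner => inner.insert a.2 (inner.getD a.2 0 + 1))
    simp only [List.foldl_cons, List.filter_cons]
    by_cases h : a.1 = c
    · rw [if_pos h.symm] at hmod
      simp only [h, beq_self_eq_true, if_true, List.map_cons, List.foldl_cons]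
      rw [ih]
      congr 1
      rw [h] at hmod
      simp [pvWStep, h, hmod]
    · rw [if_neg (fun hc => h hc.symm)] at hmod
      have hb : (a.1 == c) = false := beq_eq_false_iff_ne.mpr h
      simp only [hb, Bool.false_eq_true, if_false]
      rw [ih]
      congr 1

-- ===== VERDICT (by name: the statement is the Claim_ definition above) =====
theorem getWordTagMapAndTagCount_spec : Claim_equal_getWordTagMapAndTagCount := by
  intro lines _
  unfold Spec_getWordTagMapAndTagCount getWordTagMapAndTagCount_alt
  rw [pv_A_as_tokens]
  dsimp only
  set tokens := pvTokens lines with htok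
  have hsteps : List.foldl pvWTCStep PySem.Dict.empty tokens
      = List.foldl pvWStep PySem.Dict.empty tokens :=
    PySem.List.foldl_congr_mem tokens _ _ _ (fun d p _ => pvWTCStep_eq d p)
  rw [pv_tc_eq, hsteps]
  set WA := List.foldl pvWStep PySem.Dict.empty tokens with hWA
  set G := List.foldl (fun d p => d.modify p.1 [] (fun l => l ++ [p.2]))
    (PySem.Dict.empty : PySem.Dict String (List String)) tokens with hG
  have hkW : WA.keys = PySem.Set.ofList (tokens.map (fun p => p.1)) := by
    rw [hWA]
    simpa [PySem.Set.update_nil_left] using PySem.Dict.keys_foldl_modify_key tokens (fun p => p.1)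
      PySem.Dict.empty (fun _ p inner => inner.insert p.2 (inner.getD p.2 0 + 1)) PySem.Dict.empty
  have hkG : G.keys = PySem.Set.ofList (tokens.map (fun p => p.1)) := by
    rw [hG]
    simpa [PySem.Set.update_nil_left] using PySem.Dict.keys_foldl_modify_key tokens (fun p => p.1)
      [] (fun _ p l => l ++ [p.2]) PySem.Dict.empty
  have hndW : WA.keys.Nodup := by rw [hkW]; exact PySem.Set.nodup_ofList _
  have hndG : G.keys.Nodup := by rw [hkG]; exact PySem.Set.nodup_ofList _
  refine Prod.ext ?_ rfl
  rw [PySem.Dict.items_eq_map_keys WA hndW PySem.Dict.empty,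
      PySem.Dict.items_eq_map_keys G hndG [], hkW, hkG, List.map_map, List.map_map]
  refine List.map_congr_left (fun k _ => ?_)
  have h1 : WA.getD k PySem.Dict.empty =
      pvCount ((tokens.filter (fun p => p.1 == k)).map (fun p => p.2)) := by
    rw [hWA, pv_wtc_getD]
    rfl
  have h2 : G.getD k [] = (tokens.filter (fun p => p.1 == k)).map (fun p => p.2) := by
    simpa [hG] using PySem.Dict.getD_foldl_modify_append tokens PySem.Dict.empty k
  simp [Function.comp, h1, h2]
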